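-- pv_equiv track=rewrite | github.com/rcmhunt71/MD_CICD | Utils/nginx/get_nginx_domains.py | sort_fqdns
-- ===== SOURCE A (Python) =====
-- import typing
--
-- def sort_fqdns(fqdns: typing.List[str]) -> typing.List[str]:
--     """
--     Sort the FDQNs, first broken up into environment FDQNs and then FQDNs that start with the version number
--     Then sort each grouping in alphabetical order. The groups will be separated by an element = "======"
--
--     :param fqdns: List of sorted, fully qualified domain names
--
--     :return: List of sorted FDQNs
--     """
--     twenty = 'twenty'
--     nineteen = 'nineteen'
--     max_len = 0
--     version = []
--     envs = []
--
--     for fqdn in set(x.lower() for x in fqdns):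
--         max_len = max_len if len(fqdn) < max_len else len(fqdn)
--         if fqdn.lower().startswith(twenty) or fqdn.lower().startswith(nineteen):
--             version.append(fqdn.lower())
--         else:
--             envs.append(fqdn.lower())
--     return sorted(envs) + ["=" * max_len] + sorted(version)
-- ===== SOURCE B (Python) =====
-- import typing
--
-- def sort_fqdns(fqdns: typing.List[str]) -> typing.List[str]:
--     def group(x):
--         return x.startswith('twenty') or x.startswith('nineteen')
--     deduped = {x.lower() for x in fqdns}
--     result = sorted(deduped, key=lambda x: (group(x), x))
--     cut = sum(1 for x in result if not group(x))
--     result.insert(cut, '=' * max(map(len, deduped), default=0))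
--     return result
-- ===== Notes on version B (the rewrite author's own statement) =====
-- stated objective: alternative
-- what changed: A partitions into two lists while tracking a running max and sorts each group separately; B performs a single sort of the deduped set under the composite key (group, name) and splices the separator into that one sorted list at the counted group boundary.
import Mathlib
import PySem

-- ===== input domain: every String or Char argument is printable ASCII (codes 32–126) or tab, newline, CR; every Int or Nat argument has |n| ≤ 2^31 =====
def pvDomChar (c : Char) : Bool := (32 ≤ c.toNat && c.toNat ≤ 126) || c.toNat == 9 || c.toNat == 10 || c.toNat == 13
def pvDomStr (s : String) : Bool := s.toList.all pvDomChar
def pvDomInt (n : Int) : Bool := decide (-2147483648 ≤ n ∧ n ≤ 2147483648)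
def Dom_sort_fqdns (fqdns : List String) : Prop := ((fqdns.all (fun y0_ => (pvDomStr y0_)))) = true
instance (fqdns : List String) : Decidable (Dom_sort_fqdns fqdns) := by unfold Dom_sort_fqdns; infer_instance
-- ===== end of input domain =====

-- B replaces A's partition-into-two-lists-then-sort-each by ONE sort of the deduped set
-- under the composite key (group, name), splicing the separator at the counted boundary.


-- ===== PORT A =====
-- loop body of A's `for fqdn in set(x.lower() for x in fqdns)`
def pvStepA (acc : Int × List String × List String) (fqdn : String) : Int × List String × List String :=
  let maxLen := if PySem.Str.len fqdn < acc.1 then acc.1 else PySem.Str.len fqdn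
  if PySem.Str.startswith (PySem.Str.lower fqdn) "twenty"
      || PySem.Str.startswith (PySem.Str.lower fqdn) "nineteen" then
    (maxLen, acc.2.1 ++ [PySem.Str.lower fqdn], acc.2.2)
  else
    (maxLen, acc.2.1, acc.2.2 ++ [PySem.Str.lower fqdn])

def sort_fqdns (fqdns : List String) : List String :=
  let st := (PySem.Set.ofList (fqdns.map (fun x => PySem.Str.lower x))).foldl pvStepA (0, [], [])
  -- "=" * max_len ported by hand: exact, since max_len ≥ 0 (it starts at 0 and only grows)
  PySem.List.sorted st.2.2 (fun x => x)
    ++ [String.ofList (List.replicate st.1.toNat '=')]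
    ++ PySem.List.sorted st.2.1 (fun x => x)

-- ===== PORT B =====
-- Source B's `group(x)`
def pvGroup (x : String) : Bool :=
  PySem.Str.startswith x "twenty" || PySem.Str.startswith x "nineteen"

def sort_fqdns_alt (fqdns : List String) : List String :=
  let deduped := PySem.Set.ofList (fqdns.map (fun x => PySem.Str.lower x))
  -- sorted(deduped, key=lambda x: (group(x), x))
  let result := PySem.List.sorted2 deduped (fun x => pvGroup x) (fun x => x)
  -- cut = sum(1 for x in result if not group(x))
  let cut := result.foldl (fun acc x => if !pvGroup x then acc + (1 : Int) else acc) 0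
  -- result.insert(cut, '=' * max(map(len, deduped), default=0)); '=' * n ported by hand (n ≥ 0)
  PySem.List.insert result cut
    (String.ofList (List.replicate
      (PySem.List.maxD (deduped.map (fun x => PySem.Str.len x)) (fun n => n) 0).toNat '='))

-- ===== PRECONDITION & SPEC =====
def Spec_sort_fqdns (fqdns : List String) (out : List String) : Prop := out = sort_fqdns_alt fqdns
instance (fqdns : List String) (out : List String) : Decidable (Spec_sort_fqdns fqdns out) := by unfold Spec_sort_fqdns; infer_instance

-- ===== CLAIM =====
def Claim_equal_sort_fqdns : Prop := ∀ (fqdns : List String), Dom_sort_fqdns fqdns → Spec_sort_fqdns fqdns (sort_fqdns fqdns)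

-- ===== LEMMAS AND PROOFS =====

theorem pv_char_le_iff (a b : Char) : a ≤ b ↔ a.toNat ≤ b.toNat := by
  rw [Char.le_def, Char.toNat, Char.toNat, UInt32.le_iff_toNat_le]

theorem pv_lowerChar_idem (c : Char) :
    PySem.Chars.lowerChar (PySem.Chars.lowerChar c) = PySem.Chars.lowerChar c := by
  unfold PySem.Chars.lowerChar PySem.Chars.isupper
  cases hB : (decide ('A' ≤ c) && decide (c ≤ 'Z')) with
  | false => simp [hB]
  | true =>
    simp only [Bool.and_eq_true, decide_eq_true_eq] at hB
    have h1 : 65 ≤ c.toNat := (pv_char_le_iff 'A' c).mp hB.1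
    have h2 : c.toNat ≤ 90 := (pv_char_le_iff c 'Z').mp hB.2
    have hno : ¬ (Char.ofNat (c.toNat + 32) ≤ 'Z') := by
      rw [pv_char_le_iff, Char.toNat_ofNat, if_pos (by left; omega)]
      show ¬ _ ≤ 90; omega
    simp [hno]

theorem pv_lower_idem (s : String) :
    PySem.Str.lower (PySem.Str.lower s) = PySem.Str.lower s := by
  show String.ofList (PySem.Chars.lower (PySem.Str.lower s).toList) = _
  rw [PySem.Str.toList_lower]
  unfold PySem.Str.lower PySem.Chars.lower
  rw [List.map_map]
  exact congrArg String.ofList (List.map_congr_left (fun a _ => pv_lowerChar_idem a))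

theorem pv_mem_lower_fixed (fqdns : List String) (x : String)
    (hx : x ∈ PySem.Set.ofList (fqdns.map (fun y => PySem.Str.lower y))) :
    PySem.Str.lower x = x := by
  rw [PySem.Set.mem_ofList] at hx
  obtain ⟨y, -, rfl⟩ := List.mem_map.mp hx
  exact pv_lower_idem y

theorem pv_fold_spec (l : List String) (h : ∀ x ∈ l, PySem.Str.lower x = x)
    (m : Int) (v e : List String) :
    l.foldl pvStepA (m, v, e)
      = (l.foldl (fun a x => if PySem.Str.len x < a then a else PySem.Str.len x) m,
         v ++ l.filter pvGroup,
         e ++ l.filter (fun x => !(pvGroup x))) := by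
  induction l generalizing m v e with
  | nil => simp
  | cons x t ih =>
    have hx : PySem.Str.lower x = x := h x (by simp)
    have h' : ∀ y ∈ t, PySem.Str.lower y = y := fun y hy => h y (by simp [hy])
    simp only [List.foldl_cons, pvStepA, hx]
    have hc : (PySem.Str.startswith x "twenty" || PySem.Str.startswith x "nineteen") = pvGroup x := rfl
    rw [hc]
    cases hv : pvGroup x with
    | true => simp [hv, ih h']
    | false => simp [hv, ih h']

theorem pv_maxfold_opt (l : List Int) (m0 : Int) :
    l.foldl (fun a x => if x < a then a else x) m0
      = (l.foldl (fun acc x =>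
            match acc with
            | none => some x
            | some m => if m < x then some x else some m) (some m0)).getD 0 := by
  induction l generalizing m0 with
  | nil => simp
  | cons x t ih =>
    simp only [List.foldl_cons]
    have hstep : (if x < m0 then m0 else x) = (if m0 < x then x else m0) := by
      split_ifs <;> omega
    rw [hstep, ih]
    congr 1
    split_ifs <;> rfl

theorem pv_maxfold (l : List Int) (h : ∀ x ∈ l, 0 ≤ x) :
    l.foldl (fun a x => if x < a then a else x) 0
      = (PySem.List.max? l (fun n => n)).getD 0 := by
  cases l with
  | nil => simp [PySem.List.max?]
  | cons x t =>
    have hx : ¬ x < 0 := by have := h x (by simp); omega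
    simp only [List.foldl_cons, if_neg hx, PySem.List.max?]
    refine (pv_maxfold_opt t x).trans ?_
    congr 1
    congr 1
    funext acc y
    cases acc <;> rfl

-- the composite key of B's single sort, as a linearly ordered value
def pvKey (x : String) : Bool ×ₗ String := toLex (pvGroup x, x)

theorem pv_sorted2_eq_sorted_key (xs : List String) :
    PySem.List.sorted2 xs (fun x => pvGroup x) (fun x => x)
      = PySem.List.sorted xs pvKey := by
  rw [PySem.List.sorted_eq_foldl_insertBy]
  unfold PySem.List.sorted2
  simp only [if_neg (by decide : ¬ (false = true))]
  congr 1
  funext acc x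
  congr 1
  funext a b
  rcases lt_trichotomy (pvGroup a) (pvGroup b) with h | h | h
  · simp [pvKey, Prod.Lex.toLex_lt_toLex, h, not_lt_of_gt h]
  · simp [pvKey, Prod.Lex.toLex_lt_toLex, h]
  · simp [pvKey, Prod.Lex.toLex_lt_toLex, not_lt_of_gt h, h, ne_of_gt h]

theorem pv_sorted_filter (fqdns : List String) (p : String → Bool) :
    PySem.List.sorted ((PySem.Set.ofList (fqdns.map (fun y => PySem.Str.lower y))).filter p) (fun x => x)
      = (PySem.List.sorted (PySem.Set.ofList (fqdns.map (fun y => PySem.Str.lower y))) (fun x => x)).filter p := by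
  apply PySem.List.sorted_eq_of_perm_of_pairwise_lt
  · exact (PySem.List.sorted_perm _ _ _).filter p
  · exact (PySem.List.sorted_ofList_pairwise_lt _).filter p

-- B's one key-sort is A's two plain sorts laid end to end
theorem pv_keysort_split (fqdns : List String) :
    PySem.List.sorted2 (PySem.Set.ofList (fqdns.map (fun x => PySem.Str.lower x)))
        (fun x => pvGroup x) (fun x => x)
      = PySem.List.sorted ((PySem.Set.ofList (fqdns.map (fun x => PySem.Str.lower x))).filter
            (fun x => !(pvGroup x))) (fun x => x)
        ++ PySem.List.sorted ((PySem.Set.ofList (fqdns.map (fun x => PySem.Str.lower x))).filter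
            pvGroup) (fun x => x) := by
  rw [pv_sorted2_eq_sorted_key]
  apply PySem.List.sorted_eq_of_perm_of_pairwise_lt
  · refine List.Perm.trans (List.Perm.append ((PySem.List.sorted_perm _ _ _))
      ((PySem.List.sorted_perm _ _ _))) ?_
    have hp := List.filter_append_perm (fun x => !(pvGroup x))
      (PySem.Set.ofList (fqdns.map (fun x => PySem.Str.lower x)))
    simpa using hp
  · rw [pv_sorted_filter, pv_sorted_filter]
    have hall := PySem.List.sorted_ofList_pairwise_lt (fqdns.map (fun x => PySem.Str.lower x))
    rw [List.pairwise_append]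
    refine ⟨?_, ?_, ?_⟩
    · refine (hall.filter _).imp_of_mem ?_
      intro a b ha hb hlt
      have hga : pvGroup a = false := by
        have := (List.mem_filter.mp ha).2; simpa using this
      have hgb : pvGroup b = false := by
        have := (List.mem_filter.mp hb).2; simpa using this
      simp [pvKey, Prod.Lex.toLex_lt_toLex, hga, hgb, hlt]
    · refine (hall.filter _).imp_of_mem ?_
      intro a b ha hb hlt
      have hga : pvGroup a = true := (List.mem_filter.mp ha).2
      have hgb : pvGroup b = true := (List.mem_filter.mp hb).2
      simp [pvKey, Prod.Lex.toLex_lt_toLex, hga, hgb, hlt]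
    · intro a ha b hb
      have hga : pvGroup a = false := by
        have := (List.mem_filter.mp ha).2; simpa using this
      have hgb : pvGroup b = true := (List.mem_filter.mp hb).2
      simp [pvKey, Prod.Lex.toLex_lt_toLex, hga, hgb]

-- ===== VERDICT (by name: the statement is the Claim_ definition above) =====
theorem sort_fqdns_spec : Claim_equal_sort_fqdns := by
  intro fqdns _
  unfold Spec_sort_fqdns sort_fqdns sort_fqdns_alt
  rw [pv_fold_spec _ (pv_mem_lower_fixed fqdns) 0 [] []]
  simp only [List.nil_append]
  rw [pv_keysort_split fqdns]
  -- the separator position: count of non-group elements = length of the first block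
  rw [PySem.List.foldl_if_add_one (p := fun x => !pvGroup x)]
  set E := PySem.List.sorted ((PySem.Set.ofList (fqdns.map (fun x => PySem.Str.lower x))).filter
      (fun x => !(pvGroup x))) (fun x => x) with hE
  set V := PySem.List.sorted ((PySem.Set.ofList (fqdns.map (fun x => PySem.Str.lower x))).filter
      pvGroup) (fun x => x) with hV
  have hcnt : (0 : Int) + (((E ++ V).countP (fun x => !pvGroup x) : Nat) : Int)
      = ((E.length : Nat) : Int) := by
    have hEc : E.countP (fun x => !pvGroup x) = E.length := by
      apply List.countP_eq_length.mpr
      intro a ha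
      have := (List.mem_filter.mp ((PySem.List.mem_sorted _ _ _ _).mp ha)).2
      simpa using this
    have hVc : V.countP (fun x => !pvGroup x) = 0 := by
      apply List.countP_eq_zero.mpr
      intro a ha
      have := (List.mem_filter.mp ((PySem.List.mem_sorted _ _ _ _).mp ha)).2
      simp [this]
    rw [List.countP_append, hEc, hVc]
    omega
  rw [hcnt, PySem.List.insert_natCast _ _ _ (by simp)]
  rw [List.take_left, List.drop_left]
  -- the separator string: A's running max = B's max(..., default=0)
  have hmax :
      (PySem.Set.ofList (fqdns.map (fun x => PySem.Str.lower x))).foldl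
        (fun a x => if PySem.Str.len x < a then a else PySem.Str.len x) 0
      = PySem.List.maxD ((PySem.Set.ofList (fqdns.map (fun x => PySem.Str.lower x))).map
          (fun x => PySem.Str.len x)) (fun n => n) 0 := by
    rw [← List.foldl_map (f := fun x => PySem.Str.len x) (g := fun a x => if x < a then a else x)]
    rw [pv_maxfold]
    · rfl
    · intro x hx
      obtain ⟨s, -, rfl⟩ := List.mem_map.mp hx
      simp [PySem.Str.len_eq]
  rw [hmax]
  simp
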